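-- pv_equiv track=rewrite | github.com/fabianf00/ProcessMiningVisualization_WS23 | utils/log_splitting.py | exclusive_split
-- ===== SOURCE A (Python) =====
-- def exclusive_split(log: dict[tuple[str, ...], int], partitions: list[set[str]]):
--     split_logs = [{} for _ in range(len(partitions))]
--     for trace, frequency in log.items():
--         # Skip empty traces
--         if trace == tuple():
--             continue
--         for i, partition in enumerate(partitions):
--             # Check if the trace is in the partition, when all events in the trace are in the partition
--             # checking for one event would be enough, since the partition is exclusive, but to ensure correctness we check for all events
--             if all(event in partition for event in trace):
--                 split_logs[i][trace] = frequency
--                 break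
--
--     return split_logs
-- ===== SOURCE B (Python) =====
-- def exclusive_split(log: dict[tuple[str, ...], int], partitions: list[set[str]]):
--     # Index every event by the partitions that contain it, then locate each
--     # trace's partition from that index instead of scanning all partitions.
--     idx = {}
--     for i, partition in enumerate(partitions):
--         for event in partition:
--             idx.setdefault(event, []).append(i)
--     hitsets = {event: set(ids) for event, ids in idx.items()}
--     split_logs = [{} for _ in partitions]
--     for trace, frequency in log.items():
--         if not trace:
--             continue
--         cand = idx.get(trace[0], [])
--         for event in trace:
--             if not cand:
--                 break
--             hits = hitsets.get(event, set())
--             cand = [i for i in cand if i in hits]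
--         if cand:
--             split_logs[cand[0]][trace] = frequency
--     return split_logs
-- ===== Notes on version B (the rewrite author's own statement) =====
-- stated objective: faster
-- what changed: Instead of testing every trace against every partition, B builds an event-to-partition-indices map once and intersects the candidate index lists of a trace's events, so the per-trace scan over all partitions disappears.
import Mathlib
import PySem

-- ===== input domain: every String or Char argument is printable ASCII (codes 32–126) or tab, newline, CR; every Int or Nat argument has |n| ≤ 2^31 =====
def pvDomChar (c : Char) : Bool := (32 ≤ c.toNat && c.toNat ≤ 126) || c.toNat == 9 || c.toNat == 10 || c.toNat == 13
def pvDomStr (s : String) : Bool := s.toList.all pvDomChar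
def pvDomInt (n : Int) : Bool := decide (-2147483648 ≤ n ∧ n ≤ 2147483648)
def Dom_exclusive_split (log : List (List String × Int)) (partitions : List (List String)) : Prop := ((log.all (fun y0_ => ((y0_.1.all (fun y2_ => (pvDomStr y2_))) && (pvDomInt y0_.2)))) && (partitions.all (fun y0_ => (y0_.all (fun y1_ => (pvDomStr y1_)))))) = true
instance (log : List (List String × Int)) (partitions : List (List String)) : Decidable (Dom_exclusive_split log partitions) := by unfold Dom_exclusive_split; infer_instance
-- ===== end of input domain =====

-- B builds an event→partition-indices map once and finds each trace's partition
-- from it, instead of A's scan of every partition per trace (objective: faster).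

-- ===== PORT A =====
-- inner loop 'for i, partition in enumerate(partitions): if all(event in partition for event in trace): split_logs[i][trace] = frequency; break'
def pvLoopA (trace : List String) (freq : Int)
    (s : List (PySem.Dict (List String) Int)) :
    List (List String) → Nat → List (PySem.Dict (List String) Int)
  | [], _ => s
  | p :: rest, i =>
    if trace.all (fun e => p.contains e) then
      PySem.List.pySetD s (i : Int)
        ((PySem.List.pyGetD s (i : Int) PySem.Dict.empty).insert trace freq)
    else pvLoopA trace freq s rest (i + 1)

def exclusive_split (log : List (List String × Int)) (partitions : List (List String)) : List (List (List String × Int)) :=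
  let split_logs : List (PySem.Dict (List String) Int) :=
    partitions.map (fun _ => PySem.Dict.empty)
  (log.foldl
    (fun s tf => if tf.1 = [] then s else pvLoopA tf.1 tf.2 s partitions 0)
    split_logs).map PySem.Dict.items

-- ===== PORT B =====
-- 'for i, partition in enumerate(partitions): for event in partition: idx[event] = idx.get(event, []) + [i]'
def pvIdxB : List (List String) → Nat → PySem.Dict String (List Nat) → PySem.Dict String (List Nat)
  | [], _, d => d
  | p :: ps, i, d => pvIdxB ps (i + 1) (p.foldl (fun d e => d.modify e [] (fun l => l ++ [i])) d)

-- 'hitsets = {event: set(ids) for event, ids in idx.items()}'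
def pvSetsB (idx : PySem.Dict String (List Nat)) : PySem.Dict String (PySem.Set Nat) :=
  idx.items.foldl (fun d p => d.insert p.1 (PySem.Set.ofList p.2)) PySem.Dict.empty

-- 'for event in trace: if not cand: break; hits = hitsets.get(event, set()); cand = [i for i in cand if i in hits]'
def pvCandB (hitsets : PySem.Dict String (PySem.Set Nat)) : List Nat → List String → List Nat
  | cand, [] => cand
  | cand, e :: rest =>
    if cand = [] then cand
    else pvCandB hitsets (cand.filter (fun i => (hitsets.getD e PySem.Set.empty).contains i)) rest

def exclusive_split_alt (log : List (List String × Int)) (partitions : List (List String)) : List (List (List String × Int)) :=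
  let idx := pvIdxB partitions 0 PySem.Dict.empty
  let hitsets := pvSetsB idx
  let split_logs : List (PySem.Dict (List String) Int) :=
    partitions.map (fun _ => PySem.Dict.empty)
  (log.foldl
    (fun s tf =>
      if tf.1 = [] then s
      else
        let cand := pvCandB hitsets (idx.getD (PySem.List.pyGetD tf.1 0 "") []) tf.1
        if cand = [] then s
        else
          PySem.List.pySetD s ((PySem.List.pyGetD cand 0 0 : Nat) : Int)
            ((PySem.List.pyGetD s ((PySem.List.pyGetD cand 0 0 : Nat) : Int) PySem.Dict.empty).insert tf.1 tf.2))
    split_logs).map PySem.Dict.items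

-- ===== PRECONDITION & SPEC =====
def Spec_exclusive_split (log : List (List String × Int)) (partitions : List (List String)) (out : List (List (List String × Int))) : Prop := out = exclusive_split_alt log partitions
instance (log : List (List String × Int)) (partitions : List (List String)) (out : List (List (List String × Int))) : Decidable (Spec_exclusive_split log partitions out) := by unfold Spec_exclusive_split; infer_instance

-- ===== CLAIM (what is proved, stated in full; the proofs are below) =====
def Claim_equal_exclusive_split : Prop := ∀ (log : List (List String × Int)) (partitions : List (List String)), Dom_exclusive_split log partitions → Spec_exclusive_split log partitions (exclusive_split log partitions)

-- ===== LEMMAS AND PROOFS =====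

-- index of the first partition containing every event of the trace
def pvFirstMatch (trace : List String) : List (List String) → Option Nat
  | [] => none
  | p :: ps =>
    if trace.all (fun e => p.contains e) then some 0
    else (pvFirstMatch trace ps).map (· + 1)

-- value of idx[e] when the scan of `ps` starts at index k
def pvE : List (List String) → Nat → String → List Nat
  | [], _, _ => []
  | p :: ps, k, e => List.replicate (p.count e) k ++ pvE ps (k + 1) e

theorem pvE_lb (ps : List (List String)) (k : Nat) (e : String) (j : Nat)
    (h : j ∈ pvE ps k e) : k ≤ j := by
  induction ps generalizing k with
  | nil => simp [pvE] at h
  | cons p ps ih =>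
    simp [pvE, List.mem_append] at h
    rcases h with h | h
    · omega
    · have := ih (k + 1) h; omega

theorem pvE_mem (ps : List (List String)) (k : Nat) (e : String) (m : Nat)
    (hm : m < ps.length) :
    ((k + m) ∈ pvE ps k e) ↔ e ∈ ps[m] := by
  induction ps generalizing k m with
  | nil => simp at hm
  | cons p ps ih =>
    cases m with
    | zero =>
      simp only [pvE, List.mem_append, List.mem_replicate, List.getElem_cons_zero]
      constructor
      · rintro (⟨hn, _⟩ | h)
        · exact List.count_pos_iff.mp (Nat.pos_of_ne_zero hn)
        · have := pvE_lb ps (k + 1) e _ h; omega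
      · intro h
        exact Or.inl ⟨Nat.pos_iff_ne_zero.mp (List.count_pos_iff.mpr h), by omega⟩
    | succ m =>
      have hm' : m < ps.length := by simpa using hm
      have heq : k + (m + 1) = (k + 1) + m := by omega
      simp only [pvE, List.mem_append, List.mem_replicate, List.getElem_cons_succ, heq, ih (k+1) m hm']
      constructor
      · rintro (⟨_, hk⟩ | h)
        · omega
        · exact h
      · exact Or.inr

theorem pvE_contains (ps : List (List String)) (k : Nat) (e : String) (m : Nat)
    (hm : m < ps.length) :
    (pvE ps k e).contains (k + m) = ps[m].contains e := by
  rw [Bool.eq_iff_iff]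
  simp [pvE_mem ps k e m hm]


theorem pvInner_getD (p : List String) (i : Nat) (d : PySem.Dict String (List Nat)) (e : String) :
    ((p.foldl (fun d e => d.modify e [] (fun l => l ++ [i])) d).getD e []) =
      d.getD e [] ++ List.replicate (p.count e) i := by
  induction p generalizing d with
  | nil => simp
  | cons x p ih =>
    simp only [List.foldl, ih, PySem.Dict.getD_modify, List.count_cons]
    by_cases h : e = x
    · simp [h, List.replicate_succ, List.append_assoc]
    · simp [h, Ne.symm h]

theorem pvIdxB_getD (ps : List (List String)) (k : Nat) (d : PySem.Dict String (List Nat)) (e : String) :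
    (pvIdxB ps k d).getD e [] = d.getD e [] ++ pvE ps k e := by
  induction ps generalizing k d with
  | nil => simp [pvIdxB, pvE]
  | cons p ps ih => simp [pvIdxB, pvE, ih, pvInner_getD, List.append_assoc]

theorem pvCandB_eq_filter (hs : PySem.Dict String (PySem.Set Nat)) (cand : List Nat) (t : List String) :
    pvCandB hs cand t = cand.filter (fun j => t.all (fun e => (hs.getD e PySem.Set.empty).contains j)) := by
  induction t generalizing cand with
  | nil => simp [pvCandB]
  | cons e rest ih =>
    simp only [pvCandB]
    by_cases h : cand = []
    · simp [h]
    · simp only [h, ih, List.filter_filter, List.all_cons, if_false, Bool.and_comm]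

theorem pvCF_eq (t0 : String) (t : List String) (ht0 : t0 ∈ t) (Q : Nat → Bool)
    (ps : List (List String)) (k : Nat)
    (hQ : ∀ m (hm : m < ps.length), Q (k + m) = t.all (fun e => ps[m].contains e)) :
    match pvFirstMatch t ps with
    | none => (pvE ps k t0).filter Q = []
    | some j => ∃ r, (pvE ps k t0).filter Q = (k + j) :: r := by
  induction ps generalizing k with
  | nil => simp [pvFirstMatch, pvE]
  | cons p ps ih =>
    have hQ0 : Q k = t.all (fun e => p.contains e) := by
      have := hQ 0 (by simp); simpa using this
    have hrest : ∀ m (hm : m < ps.length), Q ((k + 1) + m) = t.all (fun e => ps[m].contains e) := by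
      intro m hm
      have := hQ (m + 1) (by simpa using Nat.succ_lt_succ hm)
      rw [show (k + 1) + m = k + (m + 1) by omega]; exact this
    by_cases hall : t.all (fun e => p.contains e) = true
    · have hcnt : 0 < p.count t0 := by
        refine List.count_pos_iff.mpr ?_
        have := (List.all_eq_true.mp hall) t0 ht0
        exact List.contains_iff_mem.mp (by simpa using this)
      simp only [pvFirstMatch, pvE, hall, if_true, List.filter_append, List.filter_replicate,
        hQ0, Nat.add_zero]
      obtain ⟨n, hn⟩ : ∃ n, p.count t0 = n + 1 := ⟨p.count t0 - 1, by omega⟩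
      exact ⟨List.replicate n k ++ (pvE ps (k + 1) t0).filter Q, by simp [hn, List.replicate_succ]⟩
    · have hQk : Q k = false := by rw [hQ0]; exact Bool.eq_false_iff.mpr hall
      have := ih (k + 1) hrest
      simp only [pvFirstMatch, pvE, hall, List.filter_append, List.filter_replicate, hQk]
      cases hfm : pvFirstMatch t ps with
      | none => rw [hfm] at this; simpa using this
      | some j =>
        rw [hfm] at this
        obtain ⟨r, hr⟩ := this
        exact ⟨r, by simp [hr, Nat.add_assoc, Nat.add_comm 1 j]⟩

theorem pvLoopA_eq (trace : List String) (f : Int) (s : List (PySem.Dict (List String) Int))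
    (ps : List (List String)) (i : Nat) :
    (pvLoopA trace f s ps i : List (PySem.Dict (List String) Int)) =
      match pvFirstMatch trace ps with
      | none => s
      | some j =>
        PySem.List.pySetD s ((i + j : Nat) : Int)
          ((PySem.List.pyGetD s ((i + j : Nat) : Int) PySem.Dict.empty).insert trace f) := by
  induction ps generalizing i with
  | nil => simp [pvLoopA, pvFirstMatch]
  | cons p ps ih =>
    by_cases hall : trace.all (fun e => p.contains e) = true
    · simp only [pvLoopA, pvFirstMatch, hall, if_true]
      simp
    · simp only [pvLoopA, pvFirstMatch, hall, if_false, Bool.false_eq_true]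
      rw [ih (i + 1)]
      cases hfm : pvFirstMatch trace ps with
      | none => simp
      | some j => simp only [Option.map_some]; rw [show (i + 1) + j = i + (j + 1) by omega]


theorem pvIdxB_nodup_keys (ps : List (List String)) (k : Nat) (d : PySem.Dict String (List Nat))
    (h : d.keys.Nodup) : (pvIdxB ps k d).keys.Nodup := by
  induction ps generalizing k d with
  | nil => simpa [pvIdxB] using h
  | cons p ps ih =>
    exact ih (k + 1) _ (PySem.Dict.nodup_keys_foldl_modify_key p (fun e => e) [] (fun _ _ l => l ++ [k]) d h)

theorem pvSetsB_items (idx : PySem.Dict String (List Nat)) (h : idx.keys.Nodup) :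
    (pvSetsB idx).items = idx.items.map (fun p => (p.1, PySem.Set.ofList p.2)) := by
  unfold pvSetsB
  rw [PySem.Dict.items_foldl_insert_fresh]
  · simp [PySem.Dict.empty]
  · intro a _; simp
  · exact h

theorem pvSetsB_contains (idx : PySem.Dict String (List Nat)) (h : idx.keys.Nodup)
    (e : String) (i : Nat) :
    ((pvSetsB idx).getD e PySem.Set.empty).contains i = (idx.getD e []).contains i := by
  have hkeys : (pvSetsB idx).keys = idx.keys := by
    show (pvSetsB idx).items.map Prod.fst = idx.items.map Prod.fst
    rw [pvSetsB_items idx h]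
    simp
  have hnd : (pvSetsB idx).keys.Nodup := by rw [hkeys]; exact h
  cases hg : idx.get? e with
  | none =>
    have h1 : idx.getD e [] = [] := PySem.Dict.getD_of_get?_eq_none _ [] hg
    have h2 : (pvSetsB idx).get? e = none := by
      rw [PySem.Dict.get?_eq_none_iff_not_mem_keys] at hg ⊢
      rwa [hkeys]
    rw [h1, PySem.Dict.getD_of_get?_eq_none _ PySem.Set.empty h2]
    rfl
  | some v =>
    have h1 : idx.getD e [] = v := PySem.Dict.getD_of_get?_eq_some _ [] hg
    have hmem : (e, v) ∈ idx.items := PySem.Dict.mem_items_of_get?_eq_some _ hg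
    have hmem' : (e, PySem.Set.ofList v) ∈ (pvSetsB idx).items := by
      rw [pvSetsB_items idx h]
      exact List.mem_map.mpr ⟨(e, v), hmem, rfl⟩
    rw [h1, PySem.Dict.getD_of_mem_items _ hmem' hnd]
    rw [Bool.eq_iff_iff]
    simp [PySem.Set.mem_ofList]

-- ===== VERDICT (by name: the statement is the Claim_ definition above) =====
theorem exclusive_split_spec : Claim_equal_exclusive_split := by
  intro log partitions _dom
  unfold Spec_exclusive_split exclusive_split exclusive_split_alt
  have hidx : ∀ e, (pvIdxB partitions 0 PySem.Dict.empty).getD e [] = pvE partitions 0 e := by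
    intro e; rw [pvIdxB_getD]; simp
  have hstep : ∀ (s : List (PySem.Dict (List String) Int)) (tf : List String × Int),
      (if tf.1 = [] then s else pvLoopA tf.1 tf.2 s partitions 0) =
      (if tf.1 = [] then s
       else
        let cand := pvCandB (pvSetsB (pvIdxB partitions 0 PySem.Dict.empty))
          ((pvIdxB partitions 0 PySem.Dict.empty).getD (PySem.List.pyGetD tf.1 0 "") []) tf.1
        if cand = [] then s
        else
          PySem.List.pySetD s ((PySem.List.pyGetD cand 0 0 : Nat) : Int)
            ((PySem.List.pyGetD s ((PySem.List.pyGetD cand 0 0 : Nat) : Int) PySem.Dict.empty).insert tf.1 tf.2)) := by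
    intro s tf
    by_cases hnil : tf.1 = []
    · simp [hnil]
    · obtain ⟨t0, t', ht⟩ : ∃ t0 t', tf.1 = t0 :: t' := by
        cases h : tf.1 with
        | nil => exact absurd h hnil
        | cons a b => exact ⟨a, b, rfl⟩
      simp only [hnil, if_false]
      have ht0 : PySem.List.pyGetD tf.1 0 "" = t0 := by simp [ht, PySem.List.pyGetD_zero]
      have hcand : pvCandB (pvSetsB (pvIdxB partitions 0 PySem.Dict.empty))
          ((pvIdxB partitions 0 PySem.Dict.empty).getD (PySem.List.pyGetD tf.1 0 "") []) tf.1
          = (pvE partitions 0 t0).filter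
              (fun j => tf.1.all (fun e => (pvE partitions 0 e).contains j)) := by
        have hnd : (pvIdxB partitions 0 PySem.Dict.empty).keys.Nodup :=
          pvIdxB_nodup_keys partitions 0 PySem.Dict.empty (by simp)
        rw [pvCandB_eq_filter, ht0, hidx]
        congr 1
        funext j
        congr 1
        funext e
        rw [pvSetsB_contains _ hnd, hidx]
      have hQ : ∀ m (hm : m < partitions.length),
          (fun j => tf.1.all (fun e => (pvE partitions 0 e).contains j)) (0 + m)
            = tf.1.all (fun e => partitions[m].contains e) := by
        intro m hm
        simp only
        congr 1
        funext e
        exact pvE_contains partitions 0 e m hm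
      have hcf := pvCF_eq t0 tf.1 (by simp [ht])
        (fun j => tf.1.all (fun e => (pvE partitions 0 e).contains j)) partitions 0 hQ
      rw [pvLoopA_eq]
      cases hfm : pvFirstMatch tf.1 partitions with
      | none =>
        rw [hfm] at hcf
        simp only at hcf
        rw [hcand, hcf]
        simp
      | some j =>
        rw [hfm] at hcf
        simp only at hcf
        obtain ⟨r, hr⟩ := hcf
        rw [hcand, hr]
        simp [PySem.List.pyGetD_zero]
  have hfold : (fun (s : List (PySem.Dict (List String) Int)) (tf : List String × Int) =>
      if tf.1 = [] then s else pvLoopA tf.1 tf.2 s partitions 0) =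
      (fun s tf =>
        if tf.1 = [] then s
        else
          let cand := pvCandB (pvSetsB (pvIdxB partitions 0 PySem.Dict.empty))
            ((pvIdxB partitions 0 PySem.Dict.empty).getD (PySem.List.pyGetD tf.1 0 "") []) tf.1
          if cand = [] then s
          else
            PySem.List.pySetD s ((PySem.List.pyGetD cand 0 0 : Nat) : Int)
              ((PySem.List.pyGetD s ((PySem.List.pyGetD cand 0 0 : Nat) : Int) PySem.Dict.empty).insert tf.1 tf.2)) :=
    funext fun s => funext fun tf => hstep s tf
  rw [hfold]
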